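-- pv_equiv track=rewrite | github.com/nihilok/advent-of-code-2024 | puzzles/day_4.py | check_grid_for_pattern
-- ===== SOURCE A (Python) =====
-- def check_grid_for_pattern(grid, pattern):
--     found = 0
--     grid_len_y, grid_len_x = len(grid), len(grid[0])
--     pattern_len_y, pattern_len_x = len(pattern), len(pattern[0])
--     for i in range(grid_len_y - pattern_len_y + 1):
--         for j in range(grid_len_x - pattern_len_x + 1):
--             check = True
--             for k in range(pattern_len_y):
--                 for l in range(pattern_len_x):
--                     if pattern[k][l] != "." and pattern[k][l] != grid[i + k][j + l]:
--                         check = False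
--                         break
--                 if not check:
--                     break
--             if check:
--                 found += 1
--     return found
-- ===== SOURCE B (Python) =====
-- def check_grid_for_pattern(grid, pattern):
--     width = len(pattern[0])
--     constraints = [
--         (k, l, c)
--         for k, row in enumerate(pattern)
--         for l, c in enumerate(row[:width])
--         if c != "."
--     ]
--     rows = len(grid) - len(pattern) + 1
--     cols = len(grid[0]) - width + 1
--     return sum(
--         1
--         for i in range(rows)
--         for j in range(cols)
--         if all(grid[i + k][j + l] == c for k, l, c in constraints)
--     )
-- ===== Notes on version B (the rewrite author's own statement) =====
-- stated objective: alternative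
-- what changed: B precomputes a constraint table of the pattern's non-wildcard cells (k, l, c) once and tests each window with a single pass over that table, replacing A's per-window nested k/l scan with breaks.
-- outside the precondition, e.g. on check_grid_for_pattern([['a'], []], [['.']]): A returns 2, B returns 2; on check_grid_for_pattern([['a', 'x'], ['b']], [['a'], ['b']]): A returns 1, B returns 1
import Mathlib
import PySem

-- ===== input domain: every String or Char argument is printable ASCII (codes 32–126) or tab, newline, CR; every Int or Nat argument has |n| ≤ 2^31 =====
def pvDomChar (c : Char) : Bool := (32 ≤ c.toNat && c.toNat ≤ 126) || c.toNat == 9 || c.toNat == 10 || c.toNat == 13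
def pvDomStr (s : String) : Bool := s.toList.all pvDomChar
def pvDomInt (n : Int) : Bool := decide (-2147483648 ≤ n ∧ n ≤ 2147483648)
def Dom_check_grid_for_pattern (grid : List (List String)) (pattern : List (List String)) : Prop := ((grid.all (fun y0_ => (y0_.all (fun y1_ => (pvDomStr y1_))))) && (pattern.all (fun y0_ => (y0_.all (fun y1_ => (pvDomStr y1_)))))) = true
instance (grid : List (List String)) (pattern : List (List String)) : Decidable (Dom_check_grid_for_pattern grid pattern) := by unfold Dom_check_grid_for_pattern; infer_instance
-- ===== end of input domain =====

-- B replaces A's per-window nested k/l scan with a constraint table built once from the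
-- pattern (all non-wildcard cells) and a single pass over that table per window (objective:
-- alternative decomposition; same asymptotic cost, fewer cell visits when wildcards abound).

-- ===== PORT A =====
-- m[i][j] as Python indexes it (total form; Pre_ keeps all performed accesses in range)
def pvCell (m : List (List String)) (i j : Int) : String :=
  PySem.List.pyGetD (PySem.List.pyGetD m i []) j ""

-- inner 'for l in range(pattern_len_x)' with its break (false = broke out)
def pvRowLoop (grid pattern : List (List String)) (i j k : Int) : List Int → Bool
  | [] => true
  | l :: ls =>
    if pvCell pattern k l ≠ "." ∧ pvCell pattern k l ≠ pvCell grid (i + k) (j + l) then false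
    else pvRowLoop grid pattern i j k ls

-- 'for k in range(pattern_len_y)' with its break
def pvWinLoop (grid pattern : List (List String)) (i j plX : Int) : List Int → Bool
  | [] => true
  | k :: ks =>
    if pvRowLoop grid pattern i j k (PySem.List.pyRange 0 plX 1) then
      pvWinLoop grid pattern i j plX ks
    else false

def check_grid_for_pattern (grid : List (List String)) (pattern : List (List String)) : Int :=
  let gridLenY : Int := grid.length
  let gridLenX : Int := (grid.getD 0 []).length
  let patternLenY : Int := pattern.length
  let patternLenX : Int := (pattern.getD 0 []).length
  (PySem.List.pyRange 0 (gridLenY - patternLenY + 1) 1).foldl (fun found i =>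
    (PySem.List.pyRange 0 (gridLenX - patternLenX + 1) 1).foldl (fun found j =>
      if pvWinLoop grid pattern i j patternLenX (PySem.List.pyRange 0 patternLenY 1) then
        found + 1
      else found) found) 0

-- ===== PORT B =====
-- the constraint table: (k, l, c) for every non-wildcard pattern cell, row-major
def pvConstraints (pattern : List (List String)) (width : Int) : List (Int × Int × String) :=
  (PySem.List.enumerate pattern).flatMap (fun kr =>
    (PySem.List.enumerate (kr.2.take width.toNat)).filterMap (fun lc =>
      if lc.2 ≠ "." then some (kr.1, lc.1, lc.2) else none))

def check_grid_for_pattern_alt (grid : List (List String)) (pattern : List (List String)) : Int :=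
  let width : Int := (pattern.getD 0 []).length
  let cs := pvConstraints pattern width
  let rows : Int := (grid.length : Int) - pattern.length + 1
  let cols : Int := ((grid.getD 0 []).length : Int) - width + 1
  (PySem.List.pyRange 0 rows 1).foldl (fun acc i =>
    (PySem.List.pyRange 0 cols 1).foldl (fun acc j =>
      if cs.all (fun klc => pvCell grid (i + klc.1) (j + klc.2.1) == klc.2.2) then acc + 1
      else acc) acc) 0

-- ===== PRECONDITION & SPEC =====
-- Pre_ excludes empty grid/pattern (A raises IndexError on grid[0]/pattern[0]) and ragged
-- inputs (a row shorter than the first row) whose window range is nonempty: on those A can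
-- raise IndexError mid-scan, and when it happens to return anyway it is only because a
-- mismatch broke the scan before the short row was reached — an accident of access order.
def Pre_check_grid_for_pattern (grid : List (List String)) (pattern : List (List String)) : Prop :=
  grid ≠ [] ∧ pattern ≠ [] ∧
  (grid.length < pattern.length ∨
   (grid.getD 0 []).length < (pattern.getD 0 []).length ∨
   ((∀ r ∈ grid, (grid.getD 0 []).length ≤ r.length) ∧
    (∀ r ∈ pattern, (pattern.getD 0 []).length ≤ r.length)))

instance (grid : List (List String)) (pattern : List (List String)) : Decidable (Pre_check_grid_for_pattern grid pattern) := by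
  unfold Pre_check_grid_for_pattern; infer_instance

def pvWitness_check_grid_for_pattern : List (List String) × List (List String) :=
  ([["a", "b"], ["c", "d"]], [["a", "."]])

def Spec_check_grid_for_pattern (grid : List (List String)) (pattern : List (List String)) (out : Int) : Prop := out = check_grid_for_pattern_alt grid pattern
instance (grid : List (List String)) (pattern : List (List String)) (out : Int) : Decidable (Spec_check_grid_for_pattern grid pattern out) := by unfold Spec_check_grid_for_pattern; infer_instance

-- ===== CLAIM (what is proved, stated in full; the proofs are below) =====
def Claim_equal_check_grid_for_pattern : Prop := ∀ (grid : List (List String)) (pattern : List (List String)), Dom_check_grid_for_pattern grid pattern → Pre_check_grid_for_pattern grid pattern → Spec_check_grid_for_pattern grid pattern (check_grid_for_pattern grid pattern)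

-- ===== LEMMAS AND PROOFS =====

-- an empty Python range
lemma pvRangeNil {n : Int} (h : n ≤ 0) : PySem.List.pyRange 0 n 1 = [] := by
  refine List.eq_nil_iff_forall_not_mem.mpr (fun x hx => ?_)
  rw [PySem.List.mem_pyRange_one] at hx
  omega


-- the l-loop with break computes an 'all' over the remaining indices
lemma pvRowLoop_eq_all (grid pattern : List (List String)) (i j k : Int) (ls : List Int) :
    pvRowLoop grid pattern i j k ls
      = ls.all (fun l =>
          !(decide (pvCell pattern k l ≠ "." ∧ pvCell pattern k l ≠ pvCell grid (i + k) (j + l)))) := by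
  induction ls with
  | nil => rfl
  | cons l ls ih =>
    simp only [pvRowLoop, List.all_cons]
    split_ifs with h <;> simp [h, ih]

-- the k-loop with break computes an 'all' over the remaining indices
lemma pvWinLoop_eq_all (grid pattern : List (List String)) (i j plX : Int) (ks : List Int) :
    pvWinLoop grid pattern i j plX ks
      = ks.all (fun k => pvRowLoop grid pattern i j k (PySem.List.pyRange 0 plX 1)) := by
  induction ks with
  | nil => rfl
  | cons k ks ih =>
    simp only [pvWinLoop, List.all_cons]
    split_ifs with h <;> simp [h, ih]

-- 'all' respects pointwise agreement on members (membership-aware congruence)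
lemma pvAllCongrMem {a : Type} (l : List a) (p q : a -> Bool) (h : forall x, x ∈ l -> p x = q x) :
    l.all p = l.all q := by
  induction l with
  | nil => rfl
  | cons x xs ih =>
    simp only [List.all_cons, h x (by simp), ih (fun y hy => h y (by simp [hy]))]

-- per-window: A's nested scan agrees with B's pass over the constraint table
lemma pvWindow_eq (grid pattern : List (List String))
    (hp : forall r, r ∈ pattern -> (pattern.getD 0 []).length ≤ r.length) (i j : Int) :
    pvWinLoop grid pattern i j ((pattern.getD 0 []).length : Int)
        (PySem.List.pyRange 0 (pattern.length : Int) 1)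
      = (pvConstraints pattern ((pattern.getD 0 []).length : Int)).all
          (fun klc => pvCell grid (i + klc.1) (j + klc.2.1) == klc.2.2) := by
  set plX : Int := ((pattern.getD 0 []).length : Int) with hplX
  rw [pvWinLoop_eq_all]
  unfold pvConstraints
  rw [List.all_flatMap, PySem.List.enumerate_eq_map_pyRange pattern [], List.all_map]
  simp only [PySem.List.len]
  refine pvAllCongrMem _ _ _ (fun k hk => ?_)
  rw [PySem.List.mem_pyRange_one] at hk
  obtain ⟨hk0, hk1⟩ := hk
  simp only [Function.comp]
  have hrowmem : PySem.List.pyGetD pattern k [] ∈ pattern :=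
    PySem.List.pyGetD_mem pattern [] (by simp [PySem.Raise.InRange]; omega)
  have hrowlen : plX.toNat ≤ (PySem.List.pyGetD pattern k []).length := by
    rw [hplX, Int.toNat_natCast]
    exact hp _ hrowmem
  rw [pvRowLoop_eq_all]
  rw [PySem.List.enumerate_eq_map_pyRange _ "", List.all_filterMap, List.all_map]
  simp only [PySem.List.len, List.length_take]
  have hlen : ((min plX.toNat (PySem.List.pyGetD pattern k []).length : Nat) : Int) = plX := by
    omega
  rw [hlen]
  refine pvAllCongrMem _ _ _ (fun l hl => ?_)
  rw [PySem.List.mem_pyRange_one] at hl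
  obtain ⟨hl0, hl1⟩ := hl
  simp only [Function.comp]
  have hrl : l < ((PySem.List.pyGetD pattern k []).length : Int) := by omega
  have hcell : PySem.List.pyGetD ((PySem.List.pyGetD pattern k []).take plX.toNat) l ""
      = pvCell pattern k l := by
    rw [PySem.List.pyGetD_eq_getElem _ _ hl0 (by simp; omega), List.getElem_take]
    unfold pvCell
    rw [PySem.List.pyGetD_eq_getElem _ _ hl0 hrl]
  rw [hcell]
  by_cases hdot : pvCell pattern k l = "."
  · simp [hdot]
  · rw [if_pos hdot]
    by_cases heq : pvCell pattern k l = pvCell grid (i + k) (j + l)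
    · simp [heq]
    · simp [hdot, heq, Ne.symm heq]

-- ===== VERDICT (by name: the statement is the Claim_ definition above) =====
theorem check_grid_for_pattern_spec : Claim_equal_check_grid_for_pattern := by
  intro grid pattern _hdom hpre
  obtain ⟨hg, hp, hcases⟩ := hpre
  unfold Spec_check_grid_for_pattern check_grid_for_pattern check_grid_for_pattern_alt
  simp only []
  rcases hcases with hY | hX | ⟨hgr, hpr⟩
  · -- grid has fewer rows than the pattern: the outer range is empty, both return 0
    simp only [pvRangeNil (show ((grid.length : Int) - (pattern.length : Int) + 1 : Int) ≤ 0 by omega), List.foldl_nil]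
  · -- grid's first row is shorter than the pattern's: the inner range is empty on both sides
    simp only [pvRangeNil (show ((grid.getD 0 []).length : Int) - ((pattern.getD 0 []).length : Int) + 1 ≤ 0 by omega), List.foldl_nil]
  have hfun :
      (fun (found : Int) (i : Int) =>
        (PySem.List.pyRange 0 (((grid.getD 0 []).length : Int) - ((pattern.getD 0 []).length : Int) + 1) 1).foldl
          (fun found j =>
            if pvWinLoop grid pattern i j ((pattern.getD 0 []).length : Int)
                (PySem.List.pyRange 0 (pattern.length : Int) 1) then found + 1 else found) found)
      = (fun (acc : Int) (i : Int) =>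
        (PySem.List.pyRange 0 (((grid.getD 0 []).length : Int) - ((pattern.getD 0 []).length : Int) + 1) 1).foldl
          (fun acc j =>
            if (pvConstraints pattern ((pattern.getD 0 []).length : Int)).all
                (fun klc => pvCell grid (i + klc.1) (j + klc.2.1) == klc.2.2) then acc + 1 else acc) acc) := by
    funext acc i
    congr 1
    funext a j
    rw [pvWindow_eq grid pattern hpr i j]
  rw [hfun]
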